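-- pv_equiv track=rewrite | github.com/cobeylab/Flu-Middle-aged | Data/src/utils.py | get_seg_sites
-- ===== SOURCE A (Python) =====
-- def get_seg_sites(viruses):
-- 	WT = ''
-- 	for virus in viruses:
-- 		if virus.split("\n")[0].find("WT") >= 0:
-- 			WT = virus.split("\n")[1]
-- 			break
--
-- 	seg_sites = set()
-- 	for v in range(len(viruses)):
-- 		seq = viruses[v].split("\n")[1]
-- 		for s in range(len(WT)):
-- 			if WT[s] != seq[s]:
-- 				seg_sites.add(s+1)
-- 	seg_sites = sorted(list(seg_sites))
-- 	seg_sites = [[i] for i in seg_sites]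
--
-- 	wtAA = []
-- 	for s in seg_sites:
-- 		wtAA.append(WT[s[0]-1])
--
-- 	return seg_sites, wtAA, WT
-- ===== SOURCE B (Python) =====
-- def get_seg_sites(viruses):
-- 	WT = ''
-- 	for virus in viruses:
-- 		if virus.split("\n")[0].find("WT") >= 0:
-- 			WT = virus.split("\n")[1]
-- 			break
-- 	seqs = [virus.split("\n")[1] for virus in viruses]
-- 	seg_sites = []
-- 	wtAA = []
-- 	for i in range(len(WT)):
-- 		if any(seq[i] != WT[i] for seq in seqs):
-- 			seg_sites.append([i + 1])
-- 			wtAA.append(WT[i])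
-- 	return seg_sites, wtAA, WT
-- ===== Notes on version B (the rewrite author's own statement) =====
-- stated objective: simpler
-- what changed: B iterates position-first and emits seg_sites (already in increasing order) and wtAA in one pass, removing A's shared set, the sort, and the separate wtAA loop.
import Mathlib
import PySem

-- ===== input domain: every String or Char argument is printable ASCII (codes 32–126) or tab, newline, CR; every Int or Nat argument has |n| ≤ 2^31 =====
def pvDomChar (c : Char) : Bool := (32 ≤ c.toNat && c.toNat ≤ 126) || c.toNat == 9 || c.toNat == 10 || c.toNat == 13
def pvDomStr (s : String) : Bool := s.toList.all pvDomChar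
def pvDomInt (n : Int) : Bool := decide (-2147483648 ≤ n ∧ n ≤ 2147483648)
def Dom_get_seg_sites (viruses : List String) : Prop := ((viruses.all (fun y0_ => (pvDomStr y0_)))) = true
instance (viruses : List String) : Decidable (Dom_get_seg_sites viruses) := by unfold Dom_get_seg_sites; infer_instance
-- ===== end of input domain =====

-- B replaces A's shared set + sort + separate wtAA loop by one position-first pass that emits
-- seg_sites (already increasing) and wtAA together: simpler decomposition, same return value.

-- ===== PORT A =====
-- Shared helpers: both Pythons begin with the identical WT-search loop and both read
-- virus.split("\n")[1].  The separator "\n" is nonempty, so Str.split? is always some here.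
def pvLines (v : String) : List String := (PySem.Str.split? v "\n").getD []
-- lines[0] always exists (split is never empty); lines[1] = none is IndexError, excluded by Pre_
def pvLine0 (v : String) : String := (PySem.List.pyGet? (pvLines v) 0).getD ""
def pvLine1 (v : String) : String := (PySem.List.pyGet? (pvLines v) 1).getD ""
-- the 'for virus in viruses: … break' loop of both Pythons
def pvFindWT : List String → String
  | [] => ""
  | v :: rest => if 0 ≤ PySem.Str.find (pvLine0 v) "WT" then pvLine1 v else pvFindWT rest
-- s[i]: in range under Pre_, where Python returns the character (a 1-char str)
def pvCharAt (s : String) (i : Int) : Char := (PySem.Str.pyGet? s i).getD ' '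

def get_seg_sites (viruses : List String) : List (List Int) × List String × String :=
  let WT := pvFindWT viruses
  let sites : PySem.Set Int :=
    (PySem.List.pyRange 0 (PySem.List.len viruses)).foldl
      (fun acc v =>
        let seq := pvLine1 (PySem.List.pyGetD viruses v "")
        (PySem.List.pyRange 0 (PySem.Str.len WT)).foldl
          (fun acc s => if pvCharAt WT s ≠ pvCharAt seq s then PySem.Set.add acc (s + 1) else acc)
          acc)
      PySem.Set.empty
  let seg1 := PySem.List.sorted sites (fun x => x)
  let seg_sites := seg1.map (fun i => [i])
  let wtAA := seg_sites.foldl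
      (fun acc s => acc ++ [String.ofList [pvCharAt WT (PySem.List.pyGetD s 0 0 - 1)]]) []
  (seg_sites, wtAA, WT)

-- ===== PORT B =====
def get_seg_sites_alt (viruses : List String) : List (List Int) × List String × String :=
  let WT := pvFindWT viruses
  let seqs := viruses.map pvLine1
  let res := (PySem.List.pyRange 0 (PySem.Str.len WT)).foldl
      (fun (acc : List (List Int) × List String) i =>
        if seqs.any (fun seq => pvCharAt seq i != pvCharAt WT i) then
          (acc.1 ++ [[i + 1]], acc.2 ++ [String.ofList [pvCharAt WT i]])
        else acc)
      ([], [])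
  (res.1, res.2, WT)

-- ===== PRECONDITION & SPEC =====
-- Pre_ excludes exactly the inputs where the Python A raises IndexError: a virus without a second
-- line (its "\n"-split has fewer than 2 pieces), or a second line shorter than the WT sequence
-- (the second line of the FIRST virus whose first line contains "WT").
def Pre_get_seg_sites (viruses : List String) : Prop :=
  (∀ v ∈ viruses, 2 ≤ (pvLines v).length) ∧
  (∀ i, i < viruses.length →
     (0 ≤ PySem.Str.find (pvLine0 (viruses.getD i "")) "WT" ∧
      ∀ j, j < i → ¬ 0 ≤ PySem.Str.find (pvLine0 (viruses.getD j "")) "WT") →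
     ∀ v ∈ viruses, (pvLine1 (viruses.getD i "")).toList.length ≤ (pvLine1 v).toList.length)

instance (viruses : List String) : Decidable (Pre_get_seg_sites viruses) := by
  unfold Pre_get_seg_sites; infer_instance

def pvWitness_get_seg_sites : List String := ["WT strain\nABC", "v1\nAxC"]

def Spec_get_seg_sites (viruses : List String) (out : List (List Int) × List String × String) : Prop := out = get_seg_sites_alt viruses
instance (viruses : List String) (out : List (List Int) × List String × String) : Decidable (Spec_get_seg_sites viruses out) := by unfold Spec_get_seg_sites; infer_instance

-- ===== CLAIM (what is proved, stated in full; the proofs are below) =====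
def Claim_equal_get_seg_sites : Prop := ∀ (viruses : List String), Dom_get_seg_sites viruses → Pre_get_seg_sites viruses → Spec_get_seg_sites viruses (get_seg_sites viruses)

-- ===== LEMMAS AND PROOFS =====

-- B's single pass, in closed form: both output lists are maps over the filtered index list.
theorem pvFoldB (WT : String) (seqs : List String) (l : List Int)
    (a : List (List Int)) (b : List String) :
    l.foldl
      (fun (acc : List (List Int) × List String) i =>
        if seqs.any (fun seq => pvCharAt seq i != pvCharAt WT i) then
          (acc.1 ++ [[i + 1]], acc.2 ++ [String.ofList [pvCharAt WT i]])
        else acc)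
      (a, b)
    = (a ++ (l.filter (fun i => seqs.any (fun seq => pvCharAt seq i != pvCharAt WT i))).map
          (fun i => [i + 1]),
       b ++ (l.filter (fun i => seqs.any (fun seq => pvCharAt seq i != pvCharAt WT i))).map
          (fun i => String.ofList [pvCharAt WT i])) := by
  induction l generalizing a b with
  | nil => simp
  | cons x xs ih =>
    by_cases h : (seqs.any fun seq => pvCharAt seq x != pvCharAt WT x) = true
    · rw [List.foldl_cons, if_pos h, ih]
      simp [h]
    · rw [List.foldl_cons, if_neg h, ih]
      simp [h]

-- A's inner loop: Nodup is preserved …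
theorem pvInnerNodup (WT seq : String) (l : List Int) (acc : PySem.Set Int)
    (h : acc.Nodup) :
    (l.foldl
      (fun acc s => if pvCharAt WT s ≠ pvCharAt seq s then PySem.Set.add acc (s + 1) else acc)
      acc).Nodup := by
  induction l generalizing acc with
  | nil => exact h
  | cons x xs ih =>
    rw [List.foldl_cons]
    by_cases hx : pvCharAt WT x ≠ pvCharAt seq x
    · rw [if_pos hx]; exact ih _ (PySem.Set.nodup_add acc (x + 1) h)
    · rw [if_neg hx]; exact ih _ h

-- … and its membership is membership in acc or a differing position of this seq.
theorem pvInnerMem (WT seq : String) (l : List Int) (acc : PySem.Set Int) (x : Int) :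
    x ∈ l.foldl
      (fun acc s => if pvCharAt WT s ≠ pvCharAt seq s then PySem.Set.add acc (s + 1) else acc)
      acc
    ↔ x ∈ acc ∨ ∃ s ∈ l, pvCharAt WT s ≠ pvCharAt seq s ∧ x = s + 1 := by
  induction l generalizing acc with
  | nil => simp
  | cons y ys ih =>
    rw [List.foldl_cons]
    by_cases hy : pvCharAt WT y ≠ pvCharAt seq y
    · rw [if_pos hy, ih]
      constructor
      · rintro (h | ⟨s, hs, hd, hx⟩)
        · rcases (PySem.Set.mem_add acc (y + 1) x).mp h with h | h
          · exact .inl h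
          · exact .inr ⟨y, List.mem_cons_self, hy, h⟩
        · exact .inr ⟨s, List.mem_cons_of_mem _ hs, hd, hx⟩
      · rintro (h | ⟨s, hs, hd, hx⟩)
        · exact .inl ((PySem.Set.mem_add acc (y + 1) x).mpr (.inl h))
        · cases hs with
          | head => exact .inl ((PySem.Set.mem_add acc (y + 1) x).mpr (.inr hx))
          | tail _ hs => exact .inr ⟨s, hs, hd, hx⟩
    · rw [if_neg hy, ih]
      constructor
      · rintro (h | ⟨s, hs, hd, hx⟩)
        · exact .inl h
        · exact .inr ⟨s, List.mem_cons_of_mem _ hs, hd, hx⟩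
      · rintro (h | ⟨s, hs, hd, hx⟩)
        · exact .inl h
        · cases hs with
          | head => exact absurd hd hy
          | tail _ hs => exact .inr ⟨s, hs, hd, hx⟩

-- A's outer loop over the viruses: Nodup …
theorem pvOuterNodup (WT : String) (vs : List String) (acc : PySem.Set Int)
    (h : acc.Nodup) :
    (vs.foldl
      (fun acc virus =>
        (PySem.List.pyRange 0 (PySem.Str.len WT)).foldl
          (fun acc s =>
            if pvCharAt WT s ≠ pvCharAt (pvLine1 virus) s then PySem.Set.add acc (s + 1) else acc)
          acc)
      acc).Nodup := by
  induction vs generalizing acc with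
  | nil => exact h
  | cons v vs ih => exact ih _ (pvInnerNodup WT (pvLine1 v) _ acc h)

-- … and membership: some virus differs from WT at position s, x = s + 1.
theorem pvOuterMem (WT : String) (vs : List String) (acc : PySem.Set Int) (x : Int) :
    x ∈ vs.foldl
      (fun acc virus =>
        (PySem.List.pyRange 0 (PySem.Str.len WT)).foldl
          (fun acc s =>
            if pvCharAt WT s ≠ pvCharAt (pvLine1 virus) s then PySem.Set.add acc (s + 1) else acc)
          acc)
      acc
    ↔ x ∈ acc ∨ ∃ virus ∈ vs, ∃ s ∈ PySem.List.pyRange 0 (PySem.Str.len WT),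
        pvCharAt WT s ≠ pvCharAt (pvLine1 virus) s ∧ x = s + 1 := by
  induction vs generalizing acc with
  | nil => simp
  | cons v vs ih =>
    rw [List.foldl_cons, ih]
    constructor
    · rintro (h | ⟨u, hu, s, hs, hd, hx⟩)
      · rcases (pvInnerMem WT (pvLine1 v) _ acc x).mp h with h | ⟨s, hs, hd, hx⟩
        · exact .inl h
        · exact .inr ⟨v, List.mem_cons_self, s, hs, hd, hx⟩
      · exact .inr ⟨u, List.mem_cons_of_mem _ hu, s, hs, hd, hx⟩
    · rintro (h | ⟨u, hu, s, hs, hd, hx⟩)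
      · exact .inl ((pvInnerMem WT (pvLine1 v) _ acc x).mpr (.inl h))
      · cases hu with
        | head => exact .inl ((pvInnerMem WT (pvLine1 v) _ acc x).mpr (.inr ⟨s, hs, hd, hx⟩))
        | tail _ hu => exact .inr ⟨u, hu, s, hs, hd, hx⟩

-- the filtered index list underlying B has the same members as A's set
theorem pvFilterSpec (WT : String) (viruses : List String) (x : Int) :
    x ∈ ((PySem.List.pyRange 0 (PySem.Str.len WT)).filter
          (fun i => (viruses.map pvLine1).any (fun seq => pvCharAt seq i != pvCharAt WT i))).map
        (fun i => i + 1)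
    ↔ ∃ virus ∈ viruses, ∃ s ∈ PySem.List.pyRange 0 (PySem.Str.len WT),
        pvCharAt WT s ≠ pvCharAt (pvLine1 virus) s ∧ x = s + 1 := by
  simp only [List.mem_map, List.mem_filter, List.any_eq_true, List.mem_map, bne_iff_ne]
  constructor
  · rintro ⟨s, ⟨hs, seq, ⟨virus, hv, rfl⟩, hne⟩, rfl⟩
    exact ⟨virus, hv, s, hs, hne.symm, rfl⟩
  · rintro ⟨virus, hv, s, hs, hne, rfl⟩
    exact ⟨s, ⟨hs, pvLine1 virus, ⟨virus, hv, rfl⟩, hne.symm⟩, rfl⟩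

-- the filtered-and-shifted list is strictly increasing (hence Nodup)
theorem pvPairwiseF (WT : String) (viruses : List String) :
    (((PySem.List.pyRange 0 (PySem.Str.len WT)).filter
        (fun i => (viruses.map pvLine1).any (fun seq => pvCharAt seq i != pvCharAt WT i))).map
      (fun i => i + 1)).Pairwise (· < ·) :=
  ((PySem.List.pairwise_lt_pyRange_one 0 (PySem.Str.len WT)).filter _).map _
    (fun h => by omega)

-- ===== VERDICT (by name: the statement is the Claim_ definition above) =====
theorem get_seg_sites_spec : Claim_equal_get_seg_sites := by
  intro viruses _ _
  unfold Spec_get_seg_sites get_seg_sites get_seg_sites_alt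
  dsimp only
  rw [PySem.List.foldl_pyRange_zero_pyGetD viruses ""
    (fun acc virus =>
      (PySem.List.pyRange 0 (PySem.Str.len (pvFindWT viruses))).foldl
        (fun acc s =>
          if pvCharAt (pvFindWT viruses) s ≠ pvCharAt (pvLine1 virus) s
          then PySem.Set.add acc (s + 1) else acc)
        acc)
    PySem.Set.empty]
  rw [pvFoldB]
  set WT := pvFindWT viruses with hWT
  set F := (PySem.List.pyRange 0 (PySem.Str.len WT)).filter
      (fun i => (viruses.map pvLine1).any (fun seq => pvCharAt seq i != pvCharAt WT i)) with hF
  have hT : PySem.List.sorted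
      (viruses.foldl
        (fun acc virus =>
          (PySem.List.pyRange 0 (PySem.Str.len WT)).foldl
            (fun acc s =>
              if pvCharAt WT s ≠ pvCharAt (pvLine1 virus) s then PySem.Set.add acc (s + 1) else acc)
            acc)
        PySem.Set.empty)
      (fun x => x) = F.map (fun i => i + 1) := by
    apply PySem.List.sorted_eq_of_perm_of_pairwise_lt
    · refine (List.perm_ext_iff_of_nodup ?_ ?_).mpr ?_
      · exact (pvPairwiseF WT viruses).nodup
      · exact pvOuterNodup WT viruses PySem.Set.empty List.nodup_nil
      · intro x
        rw [pvFilterSpec, pvOuterMem]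
        simp
    · exact pvPairwiseF WT viruses
  rw [hT, PySem.List.foldl_append_singleton_eq_map]
  refine congrArg₂ Prod.mk ?_ (congrArg₂ Prod.mk ?_ rfl)
  · simp [List.map_map, Function.comp_def]
  · simp only [List.map_map, List.nil_append, Function.comp_def]
    refine List.map_congr_left fun i _ => ?_
    simp [PySem.List.pyGetD_zero_cons]
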